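-- pv_equiv track=rewrite | github.com/xtawb/cloudaudit | cloudaudit/intelligence/advanced.py | _has_mixed_chars
-- ===== SOURCE A (Python) =====
-- def _has_mixed_chars(token: str) -> bool:
--     """Has at least 2 of: upper, lower, digit, special."""
--     has = [
--         any(c.isupper() for c in token),
--         any(c.islower() for c in token),
--         any(c.isdigit() for c in token),
--         any(not c.isalnum() for c in token),
--     ]
--     return sum(has) >= 2
-- ===== SOURCE B (Python) =====
-- def _has_mixed_chars(token: str) -> bool:
--     """Has at least 2 of: upper, lower, digit, special."""
--     u = lo = d = s = False
--     for c in token: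
--         if c.isupper():
--             u = True
--         if c.islower():
--             lo = True
--         if c.isdigit():
--             d = True
--         if not c.isalnum():
--             s = True
--         if u + lo + d + s >= 2:
--             return True
--     return False
-- ===== Notes on version B (the rewrite author's own statement) =====
-- stated objective: alternative
-- what changed: Replaces four separate full scans of the token (one per character class) plus a sum by a single pass that updates four class flags and returns True as soon as two classes have been seen.
import Mathlib
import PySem

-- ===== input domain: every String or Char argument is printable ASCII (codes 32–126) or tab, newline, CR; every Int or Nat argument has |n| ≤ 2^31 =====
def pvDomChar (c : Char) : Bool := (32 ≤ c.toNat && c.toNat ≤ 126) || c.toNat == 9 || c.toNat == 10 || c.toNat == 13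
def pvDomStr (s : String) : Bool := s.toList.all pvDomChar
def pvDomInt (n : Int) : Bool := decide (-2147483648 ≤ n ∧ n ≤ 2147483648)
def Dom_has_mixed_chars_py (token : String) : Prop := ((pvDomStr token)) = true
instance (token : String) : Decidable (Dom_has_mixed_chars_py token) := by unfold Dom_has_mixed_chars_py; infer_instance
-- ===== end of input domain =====

-- B replaces A's four separate scans + sum by one early-exiting pass over four flags (objective: alternative decomposition).

-- ===== PORT A =====
def has_mixed_chars_py (token : String) : Bool :=
  let has : List Bool :=
    [ token.toList.any (fun c => PySem.Chars.isupper c),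
      token.toList.any (fun c => PySem.Chars.islower c),
      token.toList.any (fun c => PySem.Chars.isdigit c),
      token.toList.any (fun c => !PySem.Chars.isalnum c) ]
  decide (2 ≤ has.foldl (fun acc b => acc + (if b then (1 : Int) else 0)) 0)

-- ===== PORT B =====
-- number of class flags currently set (Python's u + lo + d + s)
def pvCnt (u lo d s : Bool) : Nat :=
  (cond u 1 0) + (cond lo 1 0) + (cond d 1 0) + (cond s 1 0)

-- the single pass with early exit
def pvAltLoop : List Char → Bool → Bool → Bool → Bool → Bool
  | [], _, _, _, _ => false
  | c :: rest, u, lo, d, s =>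
    let u := if PySem.Chars.isupper c then true else u
    let lo := if PySem.Chars.islower c then true else lo
    let d := if PySem.Chars.isdigit c then true else d
    let s := if !PySem.Chars.isalnum c then true else s
    if 2 ≤ pvCnt u lo d s then true else pvAltLoop rest u lo d s

def has_mixed_chars_py_alt (token : String) : Bool :=
  pvAltLoop token.toList false false false false

-- ===== PRECONDITION & SPEC =====
def Spec_has_mixed_chars_py (token : String) (out : Bool) : Prop := out = has_mixed_chars_py_alt token
instance (token : String) (out : Bool) : Decidable (Spec_has_mixed_chars_py token out) := by unfold Spec_has_mixed_chars_py; infer_instance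

-- ===== CLAIM (what is proved, stated in full; the proofs are below) =====
def Claim_equal_has_mixed_chars_py : Prop := ∀ (token : String), Dom_has_mixed_chars_py token → Spec_has_mixed_chars_py token (has_mixed_chars_py token)

-- ===== LEMMAS AND PROOFS =====

lemma pvCnt_mono (u lo d s x1 x2 x3 x4 : Bool) (h : 2 ≤ pvCnt u lo d s) :
    2 ≤ pvCnt (x1 || u) (x2 || lo) (x3 || d) (x4 || s) := by
  revert h; cases u <;> cases lo <;> cases d <;> cases s <;>
    cases x1 <;> cases x2 <;> cases x3 <;> cases x4 <;> decide

lemma pvAltLoop_eq (cs : List Char) : ∀ (u lo d s : Bool), pvCnt u lo d s ≤ 1 →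
    pvAltLoop cs u lo d s =
      decide (2 ≤ pvCnt (u || cs.any (fun c => PySem.Chars.isupper c))
                        (lo || cs.any (fun c => PySem.Chars.islower c))
                        (d || cs.any (fun c => PySem.Chars.isdigit c))
                        (s || cs.any (fun c => !PySem.Chars.isalnum c))) := by
  induction cs with
  | nil =>
    intro u lo d s h
    simp only [pvAltLoop, List.any_nil, Bool.or_false]
    symm; rw [decide_eq_false_iff_not]; omega
  | cons c rest ih =>
    intro u lo d s _
    simp only [pvAltLoop, List.any_cons]
    by_cases h2 : 2 ≤ pvCnt (if PySem.Chars.isupper c then true else u)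
        (if PySem.Chars.islower c then true else lo)
        (if PySem.Chars.isdigit c then true else d)
        (if !PySem.Chars.isalnum c then true else s)
    · rw [if_pos h2]
      have := pvCnt_mono _ _ _ _ (rest.any (fun c => PySem.Chars.isupper c))
        (rest.any (fun c => PySem.Chars.islower c))
        (rest.any (fun c => PySem.Chars.isdigit c))
        (rest.any (fun c => !PySem.Chars.isalnum c)) h2
      symm; rw [decide_eq_true_iff]
      revert this
      cases PySem.Chars.isupper c <;> cases PySem.Chars.islower c <;>
        cases PySem.Chars.isdigit c <;> cases PySem.Chars.isalnum c <;>
        simp [Bool.or_comm]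
    · rw [if_neg h2, ih _ _ _ _ (by omega)]
      congr 1 <;>
        cases PySem.Chars.isupper c <;> cases PySem.Chars.islower c <;>
          cases PySem.Chars.isdigit c <;> cases PySem.Chars.isalnum c <;> simp

-- ===== VERDICT (by name: the statement is the Claim_ definition above) =====
theorem has_mixed_chars_py_spec : Claim_equal_has_mixed_chars_py := by
  intro token _
  unfold Spec_has_mixed_chars_py has_mixed_chars_py has_mixed_chars_py_alt
  rw [pvAltLoop_eq _ _ _ _ _ (by decide)]
  simp only [Bool.false_or, List.foldl]
  cases token.toList.any (fun c => PySem.Chars.isupper c) <;>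
    cases token.toList.any (fun c => PySem.Chars.islower c) <;>
    cases token.toList.any (fun c => PySem.Chars.isdigit c) <;>
    cases token.toList.any (fun c => !PySem.Chars.isalnum c) <;> decide
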